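-- pv_equiv track=rewrite | github.com/Melissa980/Python-Strings-Assignment | question1.py | tally_sentiment
-- ===== SOURCE A (Python) =====
-- positive_words = ["good", "excellent", "great", "awesome", "fantastic", "superb", "amazing"]
--
-- negative_words = ["bad", "poor", "terrible", "horrible", "awful", "disappointing", "subpar"]
--
-- def tally_sentiment(review):
--     positive_count = 0
--     negative_count = 0
--
--     review_lower = review.lower()
--
--     for word in positive_words:
--         if word in review_lower:
--             positive_count += review_lower.count(word)
--
--     for word in negative_words:
--         if word in review_lower:
--             negative_count += review_lower.count(word)
--
--     return positive_count, negative_count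
-- ===== SOURCE B (Python) =====
-- positive_words = ["good", "excellent", "great", "awesome", "fantastic", "superb", "amazing"]
--
-- negative_words = ["bad", "poor", "terrible", "horrible", "awful", "disappointing", "subpar"]
--
-- def tally_sentiment(review):
--     # One left-to-right scan: at each position test every sentiment word once,
--     # instead of one full str.count scan per word. Equal totals because no
--     # sentiment word overlaps itself (no nonempty border).
--     text = review.lower()
--     positive_count = 0
--     negative_count = 0
--     for i in range(len(text)):
--         for word in positive_words:
--             if text.startswith(word, i):
--                 positive_count += 1
--         for word in negative_words:
--             if text.startswith(word, i):
--                 negative_count += 1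
--     return positive_count, negative_count
-- ===== Notes on version B (the rewrite author's own statement) =====
-- stated objective: alternative
-- what changed: Replaces the 14 independent str.count scans (one full pass over the text per sentiment word) by a single left-to-right scan of the lowered text that tests each position once against every word; totals agree because no sentiment word overlaps itself.
import Mathlib
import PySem

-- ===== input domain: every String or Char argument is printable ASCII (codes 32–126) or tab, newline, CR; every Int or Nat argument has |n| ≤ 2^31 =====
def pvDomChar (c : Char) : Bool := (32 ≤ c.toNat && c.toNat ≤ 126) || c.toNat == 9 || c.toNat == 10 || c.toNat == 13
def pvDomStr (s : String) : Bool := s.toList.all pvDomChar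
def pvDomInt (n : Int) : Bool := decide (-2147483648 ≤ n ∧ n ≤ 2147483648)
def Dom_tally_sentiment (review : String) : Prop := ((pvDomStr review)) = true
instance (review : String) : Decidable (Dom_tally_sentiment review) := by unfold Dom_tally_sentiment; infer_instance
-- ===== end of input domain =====

-- B replaces the 14 independent str.count scans by a single left-to-right scan of the
-- lowered text that tests each position against every sentiment word (alternative, same cost).

-- ===== PORT A =====
def pvPositiveWords : List String :=
  ["good", "excellent", "great", "awesome", "fantastic", "superb", "amazing"]

def pvNegativeWords : List String :=
  ["bad", "poor", "terrible", "horrible", "awful", "disappointing", "subpar"]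

def tally_sentiment (review : String) : Int × Int :=
  let review_lower := PySem.Str.lower review
  let positive_count : Int :=
    pvPositiveWords.foldl
      (fun acc word =>
        if PySem.Str.isIn word review_lower then acc + (PySem.Str.count review_lower word : Int)
        else acc) 0
  let negative_count : Int :=
    pvNegativeWords.foldl
      (fun acc word =>
        if PySem.Str.isIn word review_lower then acc + (PySem.Str.count review_lower word : Int)
        else acc) 0
  (positive_count, negative_count)

-- ===== PORT B =====
-- text.startswith(word, i): Python reads i as a slice bound, so this is word <+: text[i:]
-- (exact for every Int i, matching Python's clamping of slice bounds)
def pvStartsWithAt (text : String) (word : String) (i : Int) : Bool :=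
  PySem.Str.startswith (PySem.Str.slice text (some i) none) word

def tally_sentiment_alt (review : String) : Int × Int :=
  let text := PySem.Str.lower review
  (PySem.List.pyRange 0 (PySem.Str.len text) 1).foldl
    (fun (st : Int × Int) i =>
      (pvPositiveWords.foldl (fun a word => if pvStartsWithAt text word i then a + 1 else a) st.1,
       pvNegativeWords.foldl (fun a word => if pvStartsWithAt text word i then a + 1 else a) st.2))
    (0, 0)

-- ===== PRECONDITION & SPEC =====
def Spec_tally_sentiment (review : String) (out : Int × Int) : Prop := out = tally_sentiment_alt review
instance (review : String) (out : Int × Int) : Decidable (Spec_tally_sentiment review out) := by unfold Spec_tally_sentiment; infer_instance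

-- ===== CLAIM (what is proved, stated in full; the proofs are below) =====
def Claim_equal_tally_sentiment : Prop := ∀ (review : String), Dom_tally_sentiment review → Spec_tally_sentiment review (tally_sentiment review)

-- ===== LEMMAS AND PROOFS =====

-- a word is nonempty and has no nonempty proper border (so occurrences cannot overlap)
def pvNoOverlap (w : List Char) : Bool :=
  !w.isEmpty && (List.range w.length).all (fun k => k == 0 || !(w.drop k).isPrefixOf w)

-- number of positions of l at which w starts
def pvOccP (w l : List Char) : Nat :=
  (List.range (l.length + 1)).countP (fun i => decide (w <+: l.drop i))

lemma pvNoOverlap_ne_nil {w : List Char} (h : pvNoOverlap w = true) : w ≠ [] := by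
  simp [pvNoOverlap] at h; exact h.1

lemma pvNoOverlap_no_border {w : List Char} (h : pvNoOverlap w = true)
    {k : Nat} (hk0 : 0 < k) (hkl : k < w.length) : ¬ (w.drop k) <+: w := by
  simp only [pvNoOverlap, Bool.and_eq_true, List.all_eq_true] at h
  have := h.2 k (List.mem_range.mpr hkl)
  rcases Bool.or_eq_true_iff.mp this with h0 | hnp
  · have : k = 0 := by simpa using h0
    omega
  · intro hc
    have : (w.drop k).isPrefixOf w = true := List.isPrefixOf_iff_prefix.mpr hc
    simp [this] at hnp

lemma pv_no_match_inside {w l : List Char} (h : pvNoOverlap w = true)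
    (hl : w <+: l) {k : Nat} (hk0 : 0 < k) (hkl : k < w.length) : ¬ w <+: l.drop k := by
  intro hcon
  obtain ⟨r, rfl⟩ := hl
  rw [List.drop_append] at hcon
  rw [Nat.sub_eq_zero_of_le (le_of_lt hkl), List.drop_zero] at hcon
  have h1 : w.drop k <+: w.drop k ++ r := List.prefix_append _ _
  have hlen : (w.drop k).length ≤ w.length := by simp [List.length_drop]
  exact pvNoOverlap_no_border h hk0 hkl (List.prefix_of_prefix_length_le h1 hcon hlen)

lemma pvOccP_cons (w : List Char) (c : Char) (t : List Char) :
    pvOccP w (c :: t) = (if w <+: (c :: t) then 1 else 0) + pvOccP w t := by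
  simp only [pvOccP, List.length_cons]
  rw [List.range_succ_eq_map, List.countP_cons, List.countP_map]
  have he : ((fun i => decide (w <+: List.drop i (c :: t))) ∘ Nat.succ)
      = (fun i => decide (w <+: List.drop i t)) := by
    funext i
    simp [List.drop_succ_cons]
  rw [he]
  by_cases h : w <+: c :: t <;> simp [h, Nat.add_comm]

lemma pvOccP_nil {w : List Char} (hw : w ≠ []) : pvOccP w [] = 0 := by
  simp [pvOccP, hw]

lemma pvOccP_match {w l : List Char} (h : pvNoOverlap w = true) (hl : w <+: l) :
    pvOccP w l = 1 + pvOccP w (l.drop w.length) := by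
  have hw0 : 0 < w.length := by
    have := pvNoOverlap_ne_nil h
    cases w <;> simp_all
  obtain ⟨r, hr⟩ := hl
  have hlen : l.length + 1 = w.length + (r.length + 1) := by
    rw [← hr, List.length_append]; omega
  have hdrop : l.drop w.length = r := by
    rw [← hr, List.drop_append]; simp
  rw [pvOccP, hlen, List.range_add, List.countP_append, hdrop]
  have h2 : (List.map (fun x => w.length + x) (List.range (r.length + 1))).countP
      (fun i => decide (w <+: l.drop i)) = pvOccP w r := by
    rw [List.countP_map, pvOccP]
    apply List.countP_congr
    intro j hj
    simp only [Function.comp_def]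
    rw [← hr, List.drop_append]
    have h1 : List.drop (w.length + j) w = [] := List.drop_eq_nil_of_le (by omega)
    rw [h1, Nat.add_sub_cancel_left]
    simp
  rw [h2]
  have h1 : (List.range w.length).countP (fun i => decide (w <+: l.drop i)) = 1 := by
    obtain ⟨m, hm⟩ : ∃ m, w.length = m + 1 := ⟨w.length - 1, by omega⟩
    rw [hm, List.range_succ_eq_map, List.countP_cons, List.countP_map]
    have hsucc : ((fun i => decide (w <+: l.drop i)) ∘ Nat.succ)
        = fun k => decide (w <+: l.drop (k+1)) := by
      funext k; simp
    rw [hsucc]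
    have hz : (List.range m).countP (fun k => decide (w <+: l.drop (k+1))) = 0 := by
      rw [List.countP_eq_zero]
      intro k hk
      simp only [List.mem_range] at hk
      simp only [decide_eq_true_eq]
      exact pv_no_match_inside h ⟨r, hr⟩ (Nat.succ_pos k) (by omega)
    rw [hz]
    simp
    exact ⟨r, hr⟩
  omega

lemma pv_go_eq {w : List Char} (h : pvNoOverlap w = true) :
    ∀ fuel l acc, l.length ≤ fuel → PySem.Chars.count.go w fuel l acc = acc + pvOccP w l := by
  intro fuel
  induction fuel with
  | zero =>
    intro l acc hle
    have : l = [] := List.length_eq_zero_iff.mp (Nat.le_zero.mp hle)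
    subst this
    rw [PySem.Chars.count.go.eq_def]
    simp [pvOccP_nil (pvNoOverlap_ne_nil h)]
  | succ fuel ih =>
    intro l acc hle
    cases l with
    | nil =>
      rw [PySem.Chars.count.go.eq_def]
      simp [pvOccP_nil (pvNoOverlap_ne_nil h)]
    | cons c t =>
      rw [PySem.Chars.count.go.eq_def]
      simp only []
      by_cases hp : w.isPrefixOf (c :: t) = true
      · rw [if_pos hp]
        have hpre : w <+: c :: t := List.isPrefixOf_iff_prefix.mp hp
        have hw0 : 0 < w.length := by
          have := pvNoOverlap_ne_nil h
          cases w <;> simp_all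
        have hlen : ((c :: t).drop w.length).length ≤ fuel := by
          simp only [List.length_drop, List.length_cons] at *
          omega
        rw [ih _ _ hlen, pvOccP_match h hpre]
        omega
      · rw [if_neg hp]
        have hlen : t.length ≤ fuel := by
          simp only [List.length_cons] at hle; omega
        rw [ih _ _ hlen, pvOccP_cons]
        have : ¬ w <+: (c :: t) := fun hc => hp (List.isPrefixOf_iff_prefix.mpr hc)
        simp [this]

lemma pv_count_eq_occ {w l : List Char} (h : pvNoOverlap w = true) :
    PySem.Chars.count l w = pvOccP w l := by
  have hne := pvNoOverlap_ne_nil h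
  rw [PySem.Chars.count]
  rw [if_neg (by simpa using hne)]
  have := pv_go_eq h l.length l 0 (le_refl _)
  omega

lemma pv_occ_zero_of_not_isIn {w l : List Char}
    (h : PySem.Chars.isIn w l = false) : pvOccP w l = 0 := by
  rw [pvOccP, List.countP_eq_zero]
  intro i hi
  simp only [decide_eq_true_eq]
  intro hc
  have : PySem.Chars.isIn w l = true := (PySem.Chars.exists_prefix_drop_iff_isIn w l).mp ⟨i, hc⟩
  rw [h] at this
  exact Bool.noConfusion this

-- the per-word sum A computes over one word list
lemma pvA_fold (ws : List String) (t : String) (hws : ∀ w ∈ ws, pvNoOverlap w.toList = true) (a : Int) :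
    ws.foldl (fun acc word =>
        if PySem.Str.isIn word t then acc + (PySem.Str.count t word : Int) else acc) a
      = a + (ws.map (fun w => (pvOccP w.toList t.toList : Int))).sum := by
  induction ws generalizing a with
  | nil => simp
  | cons w ws ih =>
    have hw := hws w (List.mem_cons_self)
    have hrest : ∀ x ∈ ws, pvNoOverlap x.toList = true := fun x hx => hws x (List.mem_cons_of_mem _ hx)
    simp only [List.foldl_cons, List.map_cons, List.sum_cons]
    rw [ih hrest]
    by_cases hin : PySem.Str.isIn w t = true
    · rw [if_pos hin]
      rw [PySem.Str.count_eq, pv_count_eq_occ hw]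
      ring
    · rw [if_neg hin]
      have h0 : pvOccP w.toList t.toList = 0 :=
        pv_occ_zero_of_not_isIn (by
            rw [PySem.Str.isIn_eq] at hin
            exact Bool.eq_false_iff.mpr hin)
      rw [h0]
      simp

-- B's scan over positions, one word list, as a sum of per-position hit counts
lemma pvB_fold (ws : List String) (t : String) (a : Int) :
    (PySem.List.pyRange 0 (PySem.Str.len t) 1).foldl
        (fun acc i => ws.foldl (fun x word => if pvStartsWithAt t word i then x + 1 else x) acc) a
      = a + ((List.range t.toList.length).map
          (fun k => (ws.countP (fun w => w.toList.isPrefixOf (t.toList.drop k)) : Int))).sum := by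
  have hlen : PySem.Str.len t = (t.toList.length : Int) := by simp
  rw [hlen, PySem.List.pyRange_zero_nat, List.foldl_map]
  have hstep : ∀ (acc : Int) (k : Nat),
      ws.foldl (fun x word => if pvStartsWithAt t word (k : Int) then x + 1 else x) acc
        = acc + (ws.countP (fun w => w.toList.isPrefixOf (t.toList.drop k)) : Int) := by
    intro acc k
    rw [PySem.List.foldl_if_add_one (fun word => pvStartsWithAt t word (k : Int)) ws acc]
    congr 2
    apply List.countP_congr
    intro w _
    simp only [pvStartsWithAt]
    rw [PySem.Str.startswith_eq]
    constructor
    · intro hsw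
      rw [PySem.Chars.startswith_iff] at hsw
      apply List.isPrefixOf_iff_prefix.mpr
      rw [PySem.Str.toList_slice] at hsw
      rwa [PySem.Chars.slice_eq_listSlice, PySem.List.slice_from_natCast] at hsw
    · intro hsw
      rw [PySem.Chars.startswith_iff]
      rw [PySem.Str.toList_slice, PySem.Chars.slice_eq_listSlice, PySem.List.slice_from_natCast]
      exact List.isPrefixOf_iff_prefix.mp hsw
  have hcong := PySem.List.foldl_congr_mem (List.range t.toList.length)
      (fun (x : Int) (y : Nat) =>
        ws.foldl (fun x word => if pvStartsWithAt t word (y : Int) then x + 1 else x) x)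
      (fun acc k => acc + (ws.countP (fun w => w.toList.isPrefixOf (t.toList.drop k)) : Int)) a
      (by intro acc k _; exact hstep acc k)
  rw [hcong, PySem.List.foldl_add]

-- swap the two summations: per-position hit counts total the per-word occurrence counts
lemma pv_swap (ws : List String) (t : List Char) (hws : ∀ w ∈ ws, pvNoOverlap w.toList = true) :
    ((List.range t.length).map
        (fun k => (ws.countP (fun w => w.toList.isPrefixOf (t.drop k)) : Int))).sum
      = (ws.map (fun w => (pvOccP w.toList t : Int))).sum := by
  induction ws with
  | nil => simp
  | cons w ws ih =>
    have hw := hws w (List.mem_cons_self)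
    have hrest : ∀ x ∈ ws, pvNoOverlap x.toList = true := fun x hx => hws x (List.mem_cons_of_mem _ hx)
    simp only [List.map_cons, List.sum_cons]
    have hsplit : ∀ k : Nat, ((w :: ws).countP (fun x => x.toList.isPrefixOf (t.drop k)) : Int)
        = (if w.toList.isPrefixOf (t.drop k) then 1 else 0)
          + (ws.countP (fun x => x.toList.isPrefixOf (t.drop k)) : Int) := by
      intro k
      rw [List.countP_cons]
      by_cases hp : w.toList.isPrefixOf (t.drop k) = true <;> simp [hp, Int.add_comm]
    calc ((List.range t.length).map
          (fun k => ((w :: ws).countP (fun x => x.toList.isPrefixOf (t.drop k)) : Int))).sum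
        = ((List.range t.length).map
          (fun k => (if w.toList.isPrefixOf (t.drop k) then (1:Int) else 0)
            + (ws.countP (fun x => x.toList.isPrefixOf (t.drop k)) : Int))).sum := by
          congr 1
          apply List.map_congr_left
          intro k _
          exact hsplit k
      _ = ((List.range t.length).map
            (fun k => if w.toList.isPrefixOf (t.drop k) then (1:Int) else 0)).sum
          + ((List.range t.length).map
            (fun k => (ws.countP (fun x => x.toList.isPrefixOf (t.drop k)) : Int))).sum :=
          PySem.List.sum_map_add_int _ _ _
      _ = (pvOccP w.toList t : Int)
          + (ws.map (fun x => (pvOccP x.toList t : Int))).sum := by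
          rw [ih hrest]
          congr 1
          rw [PySem.List.sum_map_ite_one_zero]
          congr 1
          -- countP over range t.length equals pvOccP: the extra position t.length never matches
          rw [pvOccP]
          rw [List.range_add]
          rw [List.countP_append]
          have hlast : (List.map (fun x => t.length + x) (List.range 1)).countP
              (fun i => decide (w.toList <+: t.drop i)) = 0 := by
            simp only [List.range_one, List.map_cons, List.map_nil, Nat.add_zero]
            rw [List.countP_eq_zero]
            intro x hx
            simp only [List.mem_singleton] at hx
            subst hx
            simp only [List.drop_length, decide_eq_true_eq]
            intro hc
            exact pvNoOverlap_ne_nil hw (List.prefix_nil.mp hc)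
          rw [hlast]
          rw [Nat.add_zero]
          apply List.countP_congr
          intro k _
          rw [List.isPrefixOf_iff_prefix]
          simp

-- per-component equality
lemma pv_component (ws : List String) (t : String)
    (hws : ∀ w ∈ ws, pvNoOverlap w.toList = true) :
    (PySem.List.pyRange 0 (PySem.Str.len t) 1).foldl
        (fun acc i => ws.foldl (fun x word => if pvStartsWithAt t word i then x + 1 else x) acc) 0
      = ws.foldl (fun acc word =>
          if PySem.Str.isIn word t then acc + (PySem.Str.count t word : Int) else acc) 0 := by
  rw [pvB_fold, pvA_fold ws t hws, pv_swap ws t.toList hws]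

lemma pvPos_noOverlap : ∀ w ∈ pvPositiveWords, pvNoOverlap w.toList = true := by decide
lemma pvNeg_noOverlap : ∀ w ∈ pvNegativeWords, pvNoOverlap w.toList = true := by decide

-- ===== VERDICT (by name: the statement is the Claim_ definition above) =====
theorem tally_sentiment_spec : Claim_equal_tally_sentiment := by
  intro review _
  simp only [Spec_tally_sentiment, tally_sentiment, tally_sentiment_alt]
  rw [PySem.List.foldl_prod_mk
    (fun (a : Int) (i : Int) =>
      pvPositiveWords.foldl (fun a word => if pvStartsWithAt (PySem.Str.lower review) word i then a + 1 else a) a)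
    (fun (b : Int) (i : Int) =>
      pvNegativeWords.foldl (fun a word => if pvStartsWithAt (PySem.Str.lower review) word i then a + 1 else a) b)]
  rw [pv_component pvPositiveWords _ pvPos_noOverlap,
      pv_component pvNegativeWords _ pvNeg_noOverlap]
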